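-- pv_equiv track=rewrite | github.com/mgm52/neural-chameleons | data/apollo_repe_deception/repe.py | process_str_tokens
-- ===== SOURCE A (Python) =====
-- def process_str_tokens(str_tokens: list[str], escape_newlines: bool = False):
--     """
--     Turn html-tag like tokens readable tokens.
--     """
--     replacements = {
--         "<bos>": "[bos]",
--         "<start_of_turn>": "[start_of_turn]",
--         "<end_of_turn>": "[end_of_turn]",
--         "<s>": "[s]",
--         "</s>": "[/s]",
--     }
--     if escape_newlines:
--         replacements["\n"] = "\\n"
--
--     for k, v in replacements.items():
--         str_tokens = [tok.replace(k, v) for tok in str_tokens]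
--
--     return str_tokens
-- ===== SOURCE B (Python) =====
-- def process_str_tokens(str_tokens: list[str], escape_newlines: bool = False):
--     """
--     Turn html-tag like tokens readable tokens.
--     Single left-to-right scan per token instead of one full replace pass per key.
--     """
--     keys = [
--         ("<bos>", "[bos]"),
--         ("<start_of_turn>", "[start_of_turn]"),
--         ("<end_of_turn>", "[end_of_turn]"),
--         ("<s>", "[s]"),
--         ("</s>", "[/s]"),
--     ]
--     if escape_newlines:
--         keys.append(("\n", "\\n"))
--
--     def scan(tok):
--         out = []
--         i = 0
--         n = len(tok)
--         while i < n:
--             for k, v in keys: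
--                 if tok.startswith(k, i):
--                     out.append(v)
--                     i += len(k)
--                     break
--             else:
--                 out.append(tok[i])
--                 i += 1
--         return "".join(out)
--
--     return [scan(t) for t in str_tokens]
-- ===== Notes on version B (the rewrite author's own statement) =====
-- stated objective: alternative
-- what changed: A runs one full replace pass over every token for each of the 5-6 keys; B does a single left-to-right scan per token, emitting the replacement of the first key that matches at the current position (valid because the keys are mutually exclusive at any position and no replacement can create or extend a key occurrence).
import Mathlib
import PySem

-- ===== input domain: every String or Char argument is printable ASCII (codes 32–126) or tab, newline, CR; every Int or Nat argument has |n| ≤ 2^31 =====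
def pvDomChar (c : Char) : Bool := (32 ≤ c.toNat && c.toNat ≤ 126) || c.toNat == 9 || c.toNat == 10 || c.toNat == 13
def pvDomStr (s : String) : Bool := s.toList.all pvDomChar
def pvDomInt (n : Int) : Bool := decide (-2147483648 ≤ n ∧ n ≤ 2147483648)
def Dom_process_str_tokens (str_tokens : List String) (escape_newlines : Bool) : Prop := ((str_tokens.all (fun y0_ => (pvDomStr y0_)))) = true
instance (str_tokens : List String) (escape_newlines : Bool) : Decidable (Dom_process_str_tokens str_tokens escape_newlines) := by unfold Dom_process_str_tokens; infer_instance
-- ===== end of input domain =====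

-- B replaces A's six sequential whole-string replace passes (one per key) by a single
-- left-to-right scan per token that looks the keys up at the current position (alternative,
-- single-pass decomposition); return values are proved identical.

-- ===== PORT A =====
def process_str_tokens (str_tokens : List String) (escape_newlines : Bool) : List String :=
  let replacements : PySem.Dict String String :=
    ((((((PySem.Dict.empty).insert "<bos>" "[bos]").insert "<start_of_turn>" "[start_of_turn]").insert
        "<end_of_turn>" "[end_of_turn]").insert "<s>" "[s]").insert "</s>" "[/s]")
  let replacements := if escape_newlines then replacements.insert "\n" "\\n" else replacements
  replacements.items.foldl
    (fun toks kv => toks.map (fun tok => PySem.Str.replace tok kv.1 kv.2)) str_tokens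

-- ===== PORT B =====
-- the keys list of Source B (the "\n" pair is present only when escape_newlines)
def pvKeysB (escape_newlines : Bool) : List (List Char × List Char) :=
  [("<bos>".toList, "[bos]".toList),
   ("<start_of_turn>".toList, "[start_of_turn]".toList),
   ("<end_of_turn>".toList, "[end_of_turn]".toList),
   ("<s>".toList, "[s]".toList),
   ("</s>".toList, "[/s]".toList)] ++
  (if escape_newlines then [(['\n'], ['\\', 'n'])] else [])

-- Source B's inner for-loop over `keys`: the first key matching at the current position
-- (none = the loop's else-branch)
def pvFirstMatch (keys : List (List Char × List Char)) (cs : List Char) :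
    Option (List Char × List Char) :=
  keys.find? (fun kv => kv.1.isPrefixOf cs)

-- Source B's while-loop: one left-to-right scan emitting replacements
-- (the kv.1 = [] branch is unreachable for pvKeysB — guard needed only for termination)
def pvScan (keys : List (List Char × List Char)) : List Char → List Char
  | [] => []
  | c :: t =>
    match pvFirstMatch keys (c :: t) with
    | some kv =>
      if hk : kv.1 = [] then c :: pvScan keys t
      else kv.2 ++ pvScan keys ((c :: t).drop kv.1.length)
    | none => c :: pvScan keys t
  termination_by cs => cs.length
  decreasing_by
  · simp
  · simp only [List.length_drop, List.length_cons]
    have : 0 < kv.1.length := List.length_pos_iff.mpr hk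
    omega

def process_str_tokens_alt (str_tokens : List String) (escape_newlines : Bool) : List String :=
  str_tokens.map (fun tok => String.ofList (pvScan (pvKeysB escape_newlines) tok.toList))

-- ===== PRECONDITION & SPEC =====
def Spec_process_str_tokens (str_tokens : List String) (escape_newlines : Bool) (out : List String) : Prop := out = process_str_tokens_alt str_tokens escape_newlines
instance (str_tokens : List String) (escape_newlines : Bool) (out : List String) : Decidable (Spec_process_str_tokens str_tokens escape_newlines out) := by unfold Spec_process_str_tokens; infer_instance

-- ===== CLAIM (what is proved, stated in full; the proofs are below) =====
def Claim_equal_process_str_tokens : Prop := ∀ (str_tokens : List String) (escape_newlines : Bool), Dom_process_str_tokens str_tokens escape_newlines → Spec_process_str_tokens str_tokens escape_newlines (process_str_tokens str_tokens escape_newlines)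

-- ===== LEMMAS AND PROOFS =====

def pvScan1 (old new : List Char) : List Char → List Char
  | [] => []
  | c :: t =>
    if h : old.isPrefixOf (c :: t) ∧ old ≠ [] then
      new ++ pvScan1 old new ((c :: t).drop old.length)
    else c :: pvScan1 old new t
  termination_by l => l.length
  decreasing_by
  · simp only [List.length_drop, List.length_cons]
    have : 0 < old.length := List.length_pos_iff.mpr h.2
    omega
  · simp

theorem pv_go_spec (old new : List Char) (hold : old ≠ []) :
    ∀ (fuel : Nat) (l acc : List Char), l.length ≤ fuel →
      PySem.Chars.replace.go old new fuel l acc = acc.reverse ++ pvScan1 old new l := by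
  intro fuel
  induction fuel with
  | zero =>
    intro l acc hl
    have : l = [] := List.length_eq_zero_iff.mp (Nat.le_zero.mp hl)
    subst this
    simp [PySem.Chars.replace.go, pvScan1]
  | succ n ih =>
    intro l acc hl
    match l with
    | [] => simp [PySem.Chars.replace.go, pvScan1]
    | c :: t =>
      rw [show PySem.Chars.replace.go old new (n+1) (c :: t) acc =
        (if old.isPrefixOf (c :: t) then
          PySem.Chars.replace.go old new n ((c :: t).drop old.length) (new.reverse ++ acc)
        else PySem.Chars.replace.go old new n t (c :: acc)) from rfl]
      have hop : 0 < old.length := List.length_pos_iff.mpr hold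
      have hlen : t.length + 1 ≤ n + 1 := by simpa using hl
      have h1 : ((c :: t).drop old.length).length ≤ n := by
        simp only [List.length_drop, List.length_cons]; omega
      have h2 : t.length ≤ n := by omega
      by_cases h : old.isPrefixOf (c :: t)
      · rw [if_pos h, ih _ _ h1, pvScan1]
        rw [dif_pos ⟨h, hold⟩]
        simp
      · rw [if_neg h, ih _ _ h2, pvScan1]
        rw [dif_neg (by simp [h])]
        simp

theorem pv_replace_eq_scan1 (old new : List Char) (hold : old ≠ []) (l : List Char) :
    PySem.Chars.replace l old new = pvScan1 old new l := by
  have : PySem.Chars.replace l old new = PySem.Chars.replace.go old new l.length l [] := by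
    simp [PySem.Chars.replace, List.isEmpty_iff, hold]
  rw [this, pv_go_spec old new hold l.length l [] le_rfl]
  simp

theorem pv_rep_step (old new : List Char) (hold : old ≠ []) (c : Char) (t : List Char) :
    PySem.Chars.replace (c :: t) old new =
      if old.isPrefixOf (c :: t) then new ++ PySem.Chars.replace ((c :: t).drop old.length) old new
      else c :: PySem.Chars.replace t old new := by
  rw [pv_replace_eq_scan1 old new hold, pv_replace_eq_scan1 old new hold,
      pv_replace_eq_scan1 old new hold, pvScan1]
  by_cases h : old.isPrefixOf (c :: t)
  · rw [dif_pos ⟨h, hold⟩, if_pos h]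
  · rw [dif_neg (by simp [h]), if_neg h]

theorem pv_rep_nil (old new : List Char) (hold : old ≠ []) :
    PySem.Chars.replace [] old new = [] := by
  rw [pv_replace_eq_scan1 old new hold, pvScan1]

theorem pv_not_prefix_append (a b r : List Char)
    (h1 : ¬ a <+: b) (h2 : ¬ b <+: a) : ¬ a <+: (b ++ r) := by
  intro h
  rcases List.prefix_or_prefix_of_prefix h (List.prefix_append b r) with hc | hc
  · exact h1 hc
  · exact h2 hc

def pvBlocks (old v : List Char) : Bool :=
  (List.range v.length).all (fun j => !(old.isPrefixOf (v.drop j)) && !((v.drop j).isPrefixOf old))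

theorem pv_blocks_tail (old : List Char) (x : Char) (v : List Char)
    (h : pvBlocks old (x :: v) = true) : pvBlocks old v = true := by
  simp only [pvBlocks, List.all_eq_true, List.mem_range] at h ⊢
  intro j hj
  have := h (j + 1) (by simpa using Nat.succ_lt_succ hj)
  simpa using this

theorem pv_pass (old new v : List Char) (hold : old ≠ []) (hb : pvBlocks old v = true) :
    ∀ rest, PySem.Chars.replace (v ++ rest) old new = v ++ PySem.Chars.replace rest old new := by
  induction v with
  | nil => simp
  | cons x v ih =>
    intro rest
    have h0 := by
      have := (List.all_eq_true.mp hb) 0 (by simp)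
      simpa using this
    have hnp : ¬ old.isPrefixOf (x :: (v ++ rest)) := by
      intro hc
      have hpfx : old <+: (x :: v) ++ rest := by
        simpa using List.isPrefixOf_iff_prefix.mp hc
      exact pv_not_prefix_append old (x :: v) rest
        (fun hp => by simp [List.isPrefixOf_iff_prefix.mpr hp] at h0)
        (fun hp => by simp [List.isPrefixOf_iff_prefix.mpr hp] at h0) hpfx
    rw [List.cons_append, pv_rep_step old new hold, if_neg (by simpa using hnp),
        ih (pv_blocks_tail old x v hb) rest]
    simp

theorem pv_no_create_aux (old new : List Char) (hold : old ≠ [])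
    (hnew : new.head? = some '[' ∨ new.head? = some '\\') :
    ∀ (n : Nat) (t w : List Char), t.length ≤ n → '[' ∉ w → '\\' ∉ w →
      w <+: PySem.Chars.replace t old new → w <+: t := by
  intro n
  induction n with
  | zero =>
    intro t w ht _ _ h
    have : t = [] := List.length_eq_zero_iff.mp (Nat.le_zero.mp ht)
    subst this
    rwa [pv_rep_nil old new hold] at h
  | succ m ih =>
    intro t w ht hw1 hw2 h
    match t with
    | [] => rwa [pv_rep_nil old new hold] at h
    | c :: t' =>
      rw [pv_rep_step old new hold] at h
      by_cases hp : old.isPrefixOf (c :: t')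
      · rw [if_pos hp] at h
        match w with
        | [] => exact List.nil_prefix
        | a :: w' =>
          exfalso
          match new, hnew with
          | nb :: new', hnew =>
            rw [List.cons_append, List.cons_prefix_cons] at h
            have ha : a = nb := h.1
            have : nb = '[' ∨ nb = '\\' := by
              rcases hnew with h' | h' <;> simp at h' <;> simp [h']
            rcases this with h' | h'
            · exact hw1 (by simp [ha, h'])
            · exact hw2 (by simp [ha, h'])
      · rw [if_neg hp] at h
        match w with
        | [] => exact List.nil_prefix
        | a :: w' =>
          rw [List.cons_prefix_cons] at h ⊢
          refine ⟨h.1, ?_⟩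
          exact ih t' w' (by simp at ht; omega)
            (fun hx => hw1 (List.mem_cons_of_mem _ hx))
            (fun hx => hw2 (List.mem_cons_of_mem _ hx)) h.2

theorem pv_no_create (old new w : List Char) (hold : old ≠ [])
    (hnew : new.head? = some '[' ∨ new.head? = some '\\')
    (hw1 : '[' ∉ w) (hw2 : '\\' ∉ w) :
    ∀ t, w <+: PySem.Chars.replace t old new → w <+: t :=
  fun t => pv_no_create_aux old new hold hnew t.length t w le_rfl hw1 hw2

def pvRep (s : List Char) (kv : List Char × List Char) : List Char :=
  PySem.Chars.replace s kv.1 kv.2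

def pvGoodKV (kv : List Char × List Char) : Prop :=
  kv.1 ≠ [] ∧ '[' ∉ kv.1 ∧ '\\' ∉ kv.1 ∧
  (kv.2.head? = some '[' ∨ kv.2.head? = some '\\')

theorem pv_fold_keep (c : Char) :
    ∀ (keys : List (List Char × List Char)) (u : List Char),
      (∀ kv ∈ keys, pvGoodKV kv) →
      (∀ kv ∈ keys, ¬ kv.1 <+: (c :: u)) →
      keys.foldl pvRep (c :: u) = c :: keys.foldl pvRep u := by
  intro keys
  induction keys with
  | nil => intro u _ _; rfl
  | cons kv keys ih =>
    intro u hg hnp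
    obtain ⟨hk, hw1, hw2, hv⟩ := hg kv (by simp)
    have hstep : pvRep (c :: u) kv = c :: pvRep u kv := by
      rw [pvRep, pv_rep_step kv.1 kv.2 hk,
        if_neg (fun hc => hnp kv (by simp) (List.isPrefixOf_iff_prefix.mp hc))]
      rfl
    rw [List.foldl_cons, List.foldl_cons, hstep]
    refine ih (pvRep u kv) (fun x hx => hg x (by simp [hx])) ?_
    intro kv' h' hc
    obtain ⟨hk', hw1', hw2', _⟩ := hg kv' (by simp [h'])
    refine hnp kv' (by simp [h']) ?_
    have : (kv'.1 : List Char) <+: PySem.Chars.replace (c :: u) kv.1 kv.2 := by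
      rw [pv_rep_step kv.1 kv.2 hk,
        if_neg (fun hc2 => hnp kv (by simp) (List.isPrefixOf_iff_prefix.mp hc2))]
      exact hc
    exact pv_no_create kv.1 kv.2 kv'.1 hk hv hw1' hw2' (c :: u) this

theorem pv_fold_pass (v : List Char) :
    ∀ (keys : List (List Char × List Char)) (rest : List Char),
      (∀ kv ∈ keys, kv.1 ≠ [] ∧ pvBlocks kv.1 v = true) →
      keys.foldl pvRep (v ++ rest) = v ++ keys.foldl pvRep rest := by
  intro keys
  induction keys with
  | nil => intro rest _; rfl
  | cons kv keys ih =>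
    intro rest hg
    obtain ⟨hk, hb⟩ := hg kv (by simp)
    rw [List.foldl_cons, List.foldl_cons,
      show pvRep (v ++ rest) kv = v ++ pvRep rest kv from pv_pass kv.1 kv.2 v hk hb rest]
    exact ih (pvRep rest kv) (fun x hx => hg x (by simp [hx]))

theorem pv_fold_nil (keys : List (List Char × List Char))
    (h : ∀ kv ∈ keys, kv.1 ≠ []) : keys.foldl pvRep [] = [] := by
  induction keys with
  | nil => rfl
  | cons kv keys ih =>
    rw [List.foldl_cons, show pvRep [] kv = [] from pv_rep_nil kv.1 kv.2 (h kv (by simp))]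
    exact ih (fun x hx => h x (by simp [hx]))

theorem pv_keys_good : ∀ (esc : Bool), ∀ kv ∈ pvKeysB esc, pvGoodKV kv := by
  intro esc kv h
  cases esc <;> fin_cases h <;> exact ⟨by decide, by decide, by decide, by decide⟩

theorem pv_keys_blocks : ∀ (esc : Bool), ∀ kv ∈ pvKeysB esc, ∀ kv' ∈ pvKeysB esc,
    (kv' ≠ kv → pvBlocks kv'.1 kv.1 = true) ∧ pvBlocks kv'.1 kv.2 = true := by
  intro esc kv h kv' h'
  cases esc <;> fin_cases h <;> fin_cases h' <;>
    exact ⟨fun hne => by revert hne; decide, by decide⟩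

theorem pvScan_cons (keys : List (List Char × List Char)) (c : Char) (t : List Char) :
    pvScan keys (c :: t) =
      match pvFirstMatch keys (c :: t) with
      | some kv =>
        if kv.1 = [] then c :: pvScan keys t
        else kv.2 ++ pvScan keys ((c :: t).drop kv.1.length)
      | none => c :: pvScan keys t := by
  rw [pvScan]
  split
  · split <;> simp_all
  · rfl

theorem pv_main_aux (esc : Bool) : ∀ (n : Nat) (cs : List Char), cs.length ≤ n →
    (pvKeysB esc).foldl pvRep cs = pvScan (pvKeysB esc) cs := by
  intro n
  induction n with
  | zero =>
    intro cs h
    have : cs = [] := List.length_eq_zero_iff.mp (Nat.le_zero.mp h)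
    subst this
    rw [show pvScan (pvKeysB esc) [] = [] from by rw [pvScan], pv_fold_nil _ (fun kv hkv => (pv_keys_good esc kv hkv).1)]
  | succ m ih =>
    intro cs hcs
    match cs with
    | [] => rw [show pvScan (pvKeysB esc) [] = [] from by rw [pvScan], pv_fold_nil _ (fun kv hkv => (pv_keys_good esc kv hkv).1)]
    | c :: t =>
      cases hfm : pvFirstMatch (pvKeysB esc) (c :: t) with
      | none =>
        have hall : ∀ kv ∈ pvKeysB esc, ¬ kv.1 <+: (c :: t) := by
          intro kv hkv hp
          have := List.find?_eq_none.mp hfm kv hkv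
          simp [List.isPrefixOf_iff_prefix.mpr hp] at this
        rw [pvScan_cons]
        simp only [hfm]
        rw [pv_fold_keep c _ t (fun kv hkv => pv_keys_good esc kv hkv) hall,
            ih t (by simp at hcs; omega)]
      | some kv =>
        obtain ⟨hpkv, pre, post, hsplit, hpre⟩ :=
          List.find?_eq_some_iff_append.mp hfm
        have hkvmem : kv ∈ pvKeysB esc := by rw [hsplit]; simp
        have hgood := pv_keys_good esc kv hkvmem
        have hk : kv.1 ≠ [] := hgood.1
        rw [pvScan_cons]
        simp only [hfm]
        rw [if_neg hk]
        obtain ⟨r, hr⟩ := List.isPrefixOf_iff_prefix.mp hpkv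
        have hdrop : (c :: t).drop kv.1.length = r := by
          rw [← hr, List.drop_left]
        have hprefix_ne : ∀ kv' ∈ pre, kv' ≠ kv := by
          intro kv' h' he
          have := hpre kv' h'
          rw [he] at this
          simp [hpkv] at this
        have hpremem : ∀ kv' ∈ pre, kv' ∈ pvKeysB esc := by
          intro kv' h'; rw [hsplit]; simp [h']
        have hpostmem : ∀ kv' ∈ post, kv' ∈ pvKeysB esc := by
          intro kv' h'; rw [hsplit]; simp [h']
        -- fold over pre walks through kv.1
        have h1 : pre.foldl pvRep (c :: t) = kv.1 ++ pre.foldl pvRep r := by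
          rw [← hr]
          exact pv_fold_pass kv.1 pre r (fun kv' h' =>
            ⟨(pv_keys_good esc kv' (hpremem kv' h')).1,
             ((pv_keys_blocks esc kv hkvmem kv' (hpremem kv' h')).1 (hprefix_ne kv' h'))⟩)
        -- the kv pass fires
        have h2 : pvRep (kv.1 ++ pre.foldl pvRep r) kv =
            kv.2 ++ pvRep (pre.foldl pvRep r) kv := by
          obtain ⟨k0, k', hkv1⟩ := List.exists_cons_of_ne_nil hk
          rw [pvRep, pvRep, hkv1, List.cons_append, pv_rep_step _ _ (by simp), if_pos (by
              rw [← List.cons_append]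
              exact List.isPrefixOf_iff_prefix.mpr (List.prefix_append _ _)),
            ← List.cons_append, List.drop_left, ← hkv1]
        -- fold over post walks through kv.2
        have h3 : post.foldl pvRep (kv.2 ++ pvRep (pre.foldl pvRep r) kv) =
            kv.2 ++ post.foldl pvRep (pvRep (pre.foldl pvRep r) kv) := by
          exact pv_fold_pass kv.2 post _ (fun kv' h' =>
            ⟨(pv_keys_good esc kv' (hpostmem kv' h')).1,
             (pv_keys_blocks esc kv hkvmem kv' (hpostmem kv' h')).2⟩)
        have hfold : (pvKeysB esc).foldl pvRep (c :: t) = kv.2 ++ (pvKeysB esc).foldl pvRep r := by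
          rw [hsplit, List.foldl_append, List.foldl_cons, h1, h2, h3,
              List.foldl_append, List.foldl_cons]
        rw [hfold, hdrop, ih r (by
          have : (c :: t).length = kv.1.length + r.length := by rw [← hr]; simp
          have h0 : 0 < kv.1.length := List.length_pos_iff.mpr hk
          simp at hcs this ⊢
          omega)]

theorem pv_main (esc : Bool) (cs : List Char) :
    (pvKeysB esc).foldl pvRep cs = pvScan (pvKeysB esc) cs :=
  pv_main_aux esc cs.length cs le_rfl

-- A's string-level replace fold equals the char-level fold
theorem pv_str_fold (keys : List (String × String)) :
    ∀ (t : String),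
      (keys.foldl (fun s kv => PySem.Str.replace s kv.1 kv.2) t).toList =
      (keys.map (fun kv => (kv.1.toList, kv.2.toList))).foldl pvRep t.toList := by
  induction keys with
  | nil => intro t; rfl
  | cons kv keys ih =>
    intro t
    rw [List.foldl_cons, List.map_cons, List.foldl_cons, ih]
    congr 1
    simp [pvRep, PySem.Str.replace]

-- A's fold over the keys of a map over the tokens, as a map of per-token folds
theorem pv_fold_map_swap (keys : List (String × String)) :
    ∀ (toks : List String),
      keys.foldl (fun ts kv => ts.map (fun tok => PySem.Str.replace tok kv.1 kv.2)) toks =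
      toks.map (fun tok => keys.foldl (fun s kv => PySem.Str.replace s kv.1 kv.2) tok) := by
  induction keys with
  | nil => intro toks; simp
  | cons kv keys ih =>
    intro toks
    rw [List.foldl_cons, ih, List.map_map]
    simp only [List.foldl_cons]
    rfl

-- per-token equality, string level
theorem pv_token (esc : Bool) (items : List (String × String))
    (hitems : items.map (fun kv => (kv.1.toList, kv.2.toList)) = pvKeysB esc) (tok : String) :
    items.foldl (fun s kv => PySem.Str.replace s kv.1 kv.2) tok =
      String.ofList (pvScan (pvKeysB esc) tok.toList) := by
  apply String.toList_inj.mp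
  rw [pv_str_fold, hitems, pv_main]
  simp

-- ===== VERDICT (by name: the statement is the Claim_ definition above) =====
theorem process_str_tokens_spec : Claim_equal_process_str_tokens := by
  intro str_tokens escape_newlines _
  unfold Spec_process_str_tokens process_str_tokens process_str_tokens_alt
  simp only []
  rw [pv_fold_map_swap]
  refine List.map_congr_left (fun tok _ => ?_)
  cases escape_newlines
  · exact pv_token false _ (by decide) tok
  · exact pv_token true _ (by decide) tok
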